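-- pv_equiv track=rewrite | github.com/prakhar-1310/AnkCoders | Prototype 4/Numerology/core/numerology_calculations.py | compute_name_number
-- ===== SOURCE A (Python) =====
-- def digit_sum(n):
--     return sum(int(i) for i in str(n))
--
-- def reduce_to_single_digit(n):
--     while n > 9:
--         n = digit_sum(n)
--     return n
--
-- def compute_name_number(name):
--     """Chaldean name sum and reduction"""
--     mapping = {
--         'A':1,'I':1,'J':1,'Q':1,'Y':1,
--         'B':2,'K':2,'R':2,
--         'C':3,'G':3,'L':3,'S':3,
--         'D':4,'M':4,'T':4,
--         'E':5,'H':5,'N':5,'X':5,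
--         'U':6,'V':6,'W':6,
--         'O':7,'Z':7,
--         'F':8,'P':8
--     }
--     total = sum(mapping.get(ch.upper(), 0) for ch in name if ch.isalpha())
--     reduced = reduce_to_single_digit(total)
--     return total, reduced
-- ===== SOURCE B (Python) =====
-- _CHALDEAN = {
--     'A':1,'I':1,'J':1,'Q':1,'Y':1,
--     'B':2,'K':2,'R':2,
--     'C':3,'G':3,'L':3,'S':3,
--     'D':4,'M':4,'T':4,
--     'E':5,'H':5,'N':5,'X':5,
--     'U':6,'V':6,'W':6,
--     'O':7,'Z':7,
--     'F':8,'P':8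
-- }
--
-- def compute_name_number(name):
--     """Chaldean name sum and reduction (digital-root closed form)"""
--     total = sum(_CHALDEAN.get(ch, 0) for ch in name.upper())
--     reduced = 0 if total == 0 else 1 + (total - 1) % 9
--     return total, reduced
-- ===== Notes on version B (the rewrite author's own statement) =====
-- stated objective: simpler
-- what changed: The iterative reduce_to_single_digit loop (repeated str()/int() digit summation) is replaced by the digital-root closed form 0 if total==0 else 1+(total-1)%9, and the per-character isalpha filter plus per-character upper() is replaced by one name.upper() pass with a direct dict lookup (non-letters are simply absent from the dict).
import Mathlib
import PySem

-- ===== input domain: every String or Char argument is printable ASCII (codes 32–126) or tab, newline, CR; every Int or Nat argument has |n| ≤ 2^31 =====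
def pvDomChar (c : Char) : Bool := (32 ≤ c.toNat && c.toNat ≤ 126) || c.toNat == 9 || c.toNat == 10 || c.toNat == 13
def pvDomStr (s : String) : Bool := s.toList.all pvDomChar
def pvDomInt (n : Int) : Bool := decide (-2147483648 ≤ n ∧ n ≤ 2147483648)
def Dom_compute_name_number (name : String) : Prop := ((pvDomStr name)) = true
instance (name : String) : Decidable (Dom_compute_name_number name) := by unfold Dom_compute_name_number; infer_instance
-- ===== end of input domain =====

-- B replaces A's iterative reduce_to_single_digit loop by the digital-root closed form and the
-- per-char isalpha filter + per-char upper() by one name.upper() pass with a direct dict lookup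
-- (objective: simpler).

-- ===== PORT A =====

-- int(i) for one char i; exact for digit characters (digit_sum is only ever applied to n > 9,
-- whose str() consists of digit characters only)
def pvDigitVal (c : Char) : Int := (PySem.Int.ofChars? [c]).getD 0

-- sum(int(i) for i in str(n))
def digit_sum (n : Int) : Int := ((PySem.Int.toStr n).toList.map pvDigitVal).sum

-- A's mapping dict; its keys are length-1 strings, ported as Char (ch.upper() of one ASCII char
-- is one char on Dom)
def pvMappingA : PySem.Dict Char Int := PySem.Dict.ofList
  [('A',1),('I',1),('J',1),('Q',1),('Y',1),
   ('B',2),('K',2),('R',2),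
   ('C',3),('G',3),('L',3),('S',3),
   ('D',4),('M',4),('T',4),
   ('E',5),('H',5),('N',5),('X',5),
   ('U',6),('V',6),('W',6),
   ('O',7),('Z',7),
   ('F',8),('P',8)]

-- lemmas cited by reduce_to_single_digit's termination proof (kept above the port for that reason)
theorem pvDigitVal_digitChar (r : Nat) (h : r < 10) : pvDigitVal (Nat.digitChar r) = (r : Int) := by
  interval_cases r <;> decide

theorem pv_core_sum : ∀ (f m : Nat) (ds : List Char), m < f →
    ((Nat.toDigitsCore 10 f m ds).map pvDigitVal).sum
      = ((Nat.digits 10 m).sum : Int) + (ds.map pvDigitVal).sum := by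
  intro f
  induction f with
  | zero => intro m ds h; omega
  | succ f ih =>
    intro m ds h
    rw [Nat.toDigitsCore]
    by_cases h10 : m / 10 = 0
    · rw [if_pos h10]
      have hm : m < 10 := by omega
      have hsum : (Nat.digits 10 m).sum = m := by
        rcases Nat.eq_zero_or_pos m with h0 | h0
        · subst h0; simp
        · rw [Nat.digits_def' (by norm_num : 1 < 10) h0, h10]
          simp [Nat.mod_eq_of_lt hm]
      simp only [List.map_cons, List.sum_cons, hsum, Nat.mod_eq_of_lt hm]
      rw [pvDigitVal_digitChar m hm]
    · rw [if_neg h10]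
      have hm0 : 0 < m := by omega
      have hrec : m / 10 < f := by
        have := Nat.div_lt_self hm0 (by norm_num : 1 < 10)
        omega
      rw [ih (m / 10) _ hrec]
      rw [Nat.digits_def' (by norm_num : 1 < 10) hm0]
      simp only [List.map_cons, List.sum_cons,
        pvDigitVal_digitChar (m % 10) (by omega)]
      push_cast
      ring

theorem pv_sum_digits_le (m : Nat) : (Nat.digits 10 m).sum ≤ m := by
  induction m using Nat.strong_induction_on with
  | _ m ih =>
    rcases Nat.eq_zero_or_pos m with h0 | h0
    · subst h0; simp
    · rw [Nat.digits_def' (by norm_num : 1 < 10) h0]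
      simp only [List.sum_cons]
      have := ih (m / 10) (Nat.div_lt_self h0 (by norm_num))
      omega

theorem pv_sum_digits_lt (m : Nat) (h : 10 ≤ m) : (Nat.digits 10 m).sum < m := by
  rw [Nat.digits_def' (by norm_num : 1 < 10) (by omega)]
  simp only [List.sum_cons]
  have := pv_sum_digits_le (m / 10)
  omega

theorem digit_sum_eq (n : Int) (h : 0 ≤ n) :
    digit_sum n = ((Nat.digits 10 n.toNat).sum : Int) := by
  unfold digit_sum
  rw [PySem.Int.toList_toStr]
  unfold PySem.Int.toChars
  rw [if_neg (by omega)]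
  unfold Nat.toDigits
  simpa using pv_core_sum (n.toNat + 1) n.toNat [] (by omega)

-- while n > 9: n = digit_sum(n); return n
def reduce_to_single_digit (n : Int) : Int :=
  if _h : 9 < n then reduce_to_single_digit (digit_sum n) else n
termination_by n.toNat
decreasing_by
  rw [digit_sum_eq n (by omega)]
  have h1 := pv_sum_digits_lt n.toNat (by omega)
  simp only [Int.toNat_natCast]
  omega

def compute_name_number (name : String) : Int × Int :=
  let total := ((name.toList.filter (fun ch => PySem.Chars.isalpha ch)).map
      (fun ch => PySem.Dict.getD pvMappingA (PySem.Chars.upperChar ch) 0)).sum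
  (total, reduce_to_single_digit total)

-- ===== PORT B =====

def pvMappingB : PySem.Dict Char Int := PySem.Dict.ofList
  [('A',1),('I',1),('J',1),('Q',1),('Y',1),
   ('B',2),('K',2),('R',2),
   ('C',3),('G',3),('L',3),('S',3),
   ('D',4),('M',4),('T',4),
   ('E',5),('H',5),('N',5),('X',5),
   ('U',6),('V',6),('W',6),
   ('O',7),('Z',7),
   ('F',8),('P',8)]

def compute_name_number_alt (name : String) : Int × Int :=
  let total := ((PySem.Str.upper name).toList.map
      (fun ch => PySem.Dict.getD pvMappingB ch 0)).sum
  let reduced := if total = 0 then 0 else 1 + PySem.Int.mod (total - 1) 9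
  (total, reduced)

-- ===== PRECONDITION & SPEC =====
def Spec_compute_name_number (name : String) (out : Int × Int) : Prop := out = compute_name_number_alt name
instance (name : String) (out : Int × Int) : Decidable (Spec_compute_name_number name out) := by unfold Spec_compute_name_number; infer_instance

-- ===== CLAIM (what is proved, stated in full; the proofs are below) =====
def Claim_equal_compute_name_number : Prop := ∀ (name : String), Dom_compute_name_number name → Spec_compute_name_number name (compute_name_number name)

-- ===== LEMMAS AND PROOFS =====

theorem pv_sum_digits_pos : ∀ m : Nat, 0 < m → 0 < (Nat.digits 10 m).sum := by
  intro m
  induction m using Nat.strong_induction_on with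
  | _ m ih =>
    intro h
    rw [Nat.digits_def' (by norm_num : 1 < 10) h]
    simp only [List.sum_cons]
    by_cases hr : 0 < m % 10
    · omega
    · have h10 : 0 < m / 10 := by omega
      have := ih (m / 10) (Nat.div_lt_self h (by norm_num)) h10
      omega

theorem pv_mod9 (a : Int) : PySem.Int.mod a 9 = a % 9 := by
  unfold PySem.Int.mod
  rw [Int.fmod_eq_emod]
  norm_num

theorem pv_reduce_droot : ∀ (k : Nat) (n : Int), 0 ≤ n → n.toNat ≤ k →
    reduce_to_single_digit n = if n = 0 then 0 else 1 + PySem.Int.mod (n - 1) 9 := by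
  intro k
  induction k with
  | zero =>
    intro n h0 hk
    have hz : n = 0 := by omega
    subst hz
    rw [reduce_to_single_digit]
    norm_num
  | succ k ih =>
    intro n h0 hk
    by_cases hbig : 9 < n
    · rw [reduce_to_single_digit, dif_pos hbig]
      have hds : digit_sum n = ((Nat.digits 10 n.toNat).sum : Int) := digit_sum_eq n h0
      have hlt : (Nat.digits 10 n.toNat).sum < n.toNat := pv_sum_digits_lt _ (by omega)
      have hpos : 0 < (Nat.digits 10 n.toNat).sum := pv_sum_digits_pos _ (by omega)
      have hmod : n.toNat % 9 = (Nat.digits 10 n.toNat).sum % 9 := Nat.modEq_nine_digits_sum n.toNat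
      rw [ih (digit_sum n) (by rw [hds]; positivity)
        (by rw [hds]; simp only [Int.toNat_natCast]; omega)]
      rw [hds]
      rw [if_neg (by exact_mod_cast hpos.ne'), if_neg (by omega)]
      rw [pv_mod9, pv_mod9]
      omega
    · rw [reduce_to_single_digit, dif_neg hbig]
      rw [pv_mod9]
      by_cases hz : n = 0
      · simp [hz]
      · rw [if_neg hz]
        omega

-- per-character agreement of the two lookups on the ASCII domain, plus nonnegativity
set_option maxRecDepth 10000 in
theorem pv_charStep : ∀ k : Nat, k < 127 →
    ((if PySem.Chars.isalpha (Char.ofNat k)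
        then PySem.Dict.getD pvMappingA (PySem.Chars.upperChar (Char.ofNat k)) 0 else 0)
      = PySem.Dict.getD pvMappingB (PySem.Chars.upperChar (Char.ofNat k)) 0)
    ∧ 0 ≤ PySem.Dict.getD pvMappingB (PySem.Chars.upperChar (Char.ofNat k)) 0 := by decide

theorem pv_charStep' (c : Char) (hc : pvDomChar c = true) :
    ((if PySem.Chars.isalpha c
        then PySem.Dict.getD pvMappingA (PySem.Chars.upperChar c) 0 else 0)
      = PySem.Dict.getD pvMappingB (PySem.Chars.upperChar c) 0)
    ∧ 0 ≤ PySem.Dict.getD pvMappingB (PySem.Chars.upperChar c) 0 := by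
  have hk : c.toNat < 127 := by
    simp only [pvDomChar, Bool.or_eq_true, Bool.and_eq_true, decide_eq_true_eq,
      beq_iff_eq] at hc
    omega
  have := pv_charStep c.toNat hk
  rwa [Char.ofNat_toNat] at this

theorem pv_filter_map_sum (p : Char → Bool) (f : Char → Int) : ∀ xs : List Char,
    ((xs.filter p).map f).sum = (xs.map (fun c => if p c then f c else 0)).sum := by
  intro xs
  induction xs with
  | nil => rfl
  | cons x xs ih => by_cases hx : p x <;> simp [hx, ih]

theorem pv_totals : ∀ xs : List Char, xs.all pvDomChar = true →
    (xs.map (fun c => if PySem.Chars.isalpha c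
        then PySem.Dict.getD pvMappingA (PySem.Chars.upperChar c) 0 else 0)).sum
      = (xs.map (fun c => PySem.Dict.getD pvMappingB (PySem.Chars.upperChar c) 0)).sum
    ∧ 0 ≤ (xs.map (fun c => PySem.Dict.getD pvMappingB (PySem.Chars.upperChar c) 0)).sum := by
  intro xs
  induction xs with
  | nil => simp
  | cons x xs ih =>
    intro h
    simp only [List.all_cons, Bool.and_eq_true] at h
    obtain ⟨hx, hxs⟩ := h
    obtain ⟨ih1, ih2⟩ := ih hxs
    obtain ⟨e1, e2⟩ := pv_charStep' x hx
    simp only [List.map_cons, List.sum_cons]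
    exact ⟨by rw [e1, ih1], by omega⟩

-- ===== VERDICT (by name: the statement is the Claim_ definition above) =====
theorem compute_name_number_spec : Claim_equal_compute_name_number := by
  intro name hdom
  unfold Spec_compute_name_number compute_name_number compute_name_number_alt
  have hdom' : name.toList.all pvDomChar = true := hdom
  obtain ⟨h1, h2⟩ := pv_totals name.toList hdom'
  have hB : ((PySem.Str.upper name).toList.map
      (fun ch => PySem.Dict.getD pvMappingB ch 0)).sum
      = (name.toList.map (fun c => PySem.Dict.getD pvMappingB (PySem.Chars.upperChar c) 0)).sum := by
    rw [PySem.Str.toList_upper]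
    unfold PySem.Chars.upper
    rw [List.map_map]
    rfl
  have hA : ((name.toList.filter (fun ch => PySem.Chars.isalpha ch)).map
      (fun ch => PySem.Dict.getD pvMappingA (PySem.Chars.upperChar ch) 0)).sum
      = (name.toList.map (fun c => if PySem.Chars.isalpha c
          then PySem.Dict.getD pvMappingA (PySem.Chars.upperChar c) 0 else 0)).sum :=
    pv_filter_map_sum _ _ _
  simp only [hA, hB, h1]
  refine Prod.ext rfl ?_
  exact pv_reduce_droot _ _ (by omega) le_rfl |>.trans rfl
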